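-- pv_equiv track=rewrite | github.com/TiagoMostardinha/UA | LECI/IA/P/aula01/aula1.py | remove_e_conta
-- ===== SOURCE A (Python) =====
-- def remove_e_conta(lista, elem):
--     if not lista:
--         return [], 0
--     (a, b) = remove_e_conta(lista[1:], elem)
--     if lista[0] == elem:
--         return (a, b+1)
--     else:
--         return (lista[:1]+a, b)
-- ===== SOURCE B (Python) =====
-- def remove_e_conta(lista, elem):
--     result = []
--     count = 0
--     for x in lista:
--         if x == elem:
--             count += 1
--         else:
--             result.append(x)
--     return result, count
-- ===== Notes on version B (the rewrite author's own statement) =====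
-- stated objective: simpler
-- what changed: Replaced A's head/tail structural recursion (which rebuilds the list with quadratic-ish list concatenation and can hit Python's recursion limit) with a single explicit accumulator loop appending kept elements and counting removals.
import Mathlib
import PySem

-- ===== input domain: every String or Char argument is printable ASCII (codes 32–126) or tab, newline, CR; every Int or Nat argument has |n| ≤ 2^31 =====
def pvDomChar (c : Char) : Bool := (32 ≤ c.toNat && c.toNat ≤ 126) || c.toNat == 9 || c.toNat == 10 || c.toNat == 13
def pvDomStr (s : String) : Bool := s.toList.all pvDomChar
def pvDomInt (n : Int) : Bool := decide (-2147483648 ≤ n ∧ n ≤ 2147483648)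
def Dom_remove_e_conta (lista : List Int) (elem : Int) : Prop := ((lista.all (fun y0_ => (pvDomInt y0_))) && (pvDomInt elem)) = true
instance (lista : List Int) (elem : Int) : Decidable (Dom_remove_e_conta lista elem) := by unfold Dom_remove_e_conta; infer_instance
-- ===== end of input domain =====

-- B replaces A's head/tail recursion by a single explicit accumulator loop (same return value).

-- ===== PORT A =====
def remove_e_conta (lista : List Int) (elem : Int) : List Int × Int :=
  match lista with
  | [] => ([], 0)
  | x :: xs =>
    let ab := remove_e_conta xs elem
    if x = elem then (ab.1, ab.2 + 1) else ([x] ++ ab.1, ab.2)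

-- ===== PORT B =====
def remove_e_conta_alt (lista : List Int) (elem : Int) : List Int × Int :=
  lista.foldl (fun st x => if x = elem then (st.1, st.2 + 1) else (st.1 ++ [x], st.2)) ([], 0)

-- ===== PRECONDITION & SPEC =====
def Spec_remove_e_conta (lista : List Int) (elem : Int) (out : List Int × Int) : Prop := out = remove_e_conta_alt lista elem
instance (lista : List Int) (elem : Int) (out : List Int × Int) : Decidable (Spec_remove_e_conta lista elem out) := by unfold Spec_remove_e_conta; infer_instance

-- ===== CLAIM (what is proved, stated in full; the proofs are below) =====
def Claim_equal_remove_e_conta : Prop := ∀ (lista : List Int) (elem : Int), Dom_remove_e_conta lista elem → Spec_remove_e_conta lista elem (remove_e_conta lista elem)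

-- ===== LEMMAS AND PROOFS =====

-- The fold from any accumulator state appends A's kept list and adds A's count.
theorem foldl_state (lista : List Int) (elem : Int) (res : List Int) (cnt : Int) :
    lista.foldl (fun st x => if x = elem then (st.1, st.2 + 1) else (st.1 ++ [x], st.2)) (res, cnt)
      = (res ++ (remove_e_conta lista elem).1, cnt + (remove_e_conta lista elem).2) := by
  induction lista generalizing res cnt with
  | nil => simp [remove_e_conta]
  | cons x xs ih =>
    simp only [List.foldl, remove_e_conta]
    by_cases h : x = elem <;> simp [h, ih] <;> ring

-- ===== VERDICT (by name: the statement is the Claim_ definition above) =====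
theorem remove_e_conta_spec : Claim_equal_remove_e_conta := by
  intro lista elem _
  unfold Spec_remove_e_conta remove_e_conta_alt
  rw [foldl_state]
  simp
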